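-- pv_equiv track=rewrite | github.com/FYI-PSA/HAT | Versteckt/RSA.py | PublicKeys
-- ===== SOURCE A (Python) =====
-- import math
--
-- def PublicKeys(phi: int) -> list[int]:
--     # You can not add even numbers since e must be coprime with (p-1) * (q-1) which is ensured to be even
--     # Saves on computation
--     valid_e = []
--     e_choices = []
--     for number in range(2, phi+1):
--         if (number & 1) == 1:
--             e_choices.append(number)
--
--     # It's gonna take forever and it's gonna be incredibley computation heavy, so just limit it to the first few thousand
--     limit = 3333
--     l_counter = 0
--
--     for number in e_choices:
--         if (l_counter > limit):
--             break
--         gcd = math.gcd(phi, number)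
--         if (gcd == 1):
--             valid_e.append(number)
--             l_counter += 1
--
--     return valid_e
-- ===== SOURCE B (Python) =====
-- def PublicKeys(phi: int) -> list[int]:
--     # Different algorithm: factor phi once by trial division, then test each odd
--     # candidate against phi's prime factors (no gcd calls), stopping as soon as
--     # 3334 values are collected -- without materialising the full odd-number list.
--     if phi < 3:
--         return []
--     primes = []
--     m = phi
--     d = 2
--     while d * d <= m:
--         if m % d == 0:
--             primes.append(d)
--             while m % d == 0:
--                 m //= d
--         d += 1
--     if m > 1:
--         primes.append(m)
--     valid_e = []
--     n = 3
--     while n <= phi and len(valid_e) < 3334: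
--         if all(n % p != 0 for p in primes):
--             valid_e.append(n)
--         n += 2
--     return valid_e
-- ===== Notes on version B (the rewrite author's own statement) =====
-- stated objective: faster
-- what changed: B factors phi once by trial division and tests each odd candidate for divisibility by those prime factors instead of calling gcd, and stops the scan as soon as the original cap of values is collected instead of first materialising the full list of odd numbers up to phi.
import Mathlib
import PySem

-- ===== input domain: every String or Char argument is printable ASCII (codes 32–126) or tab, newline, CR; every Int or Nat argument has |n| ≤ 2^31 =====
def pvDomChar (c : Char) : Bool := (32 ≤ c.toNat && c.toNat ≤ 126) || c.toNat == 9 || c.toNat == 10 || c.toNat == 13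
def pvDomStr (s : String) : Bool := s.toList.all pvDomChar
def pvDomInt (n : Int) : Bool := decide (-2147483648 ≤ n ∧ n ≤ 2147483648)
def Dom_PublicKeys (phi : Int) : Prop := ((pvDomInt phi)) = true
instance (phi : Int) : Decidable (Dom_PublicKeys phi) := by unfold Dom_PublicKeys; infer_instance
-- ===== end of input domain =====

-- B factors phi once by trial division and tests each odd candidate against the prime
-- factors (no gcd calls), stopping as soon as 3334 values are collected instead of
-- materialising the whole odd-number list first.

-- ===== PORT A =====
-- second loop of A: iterate over e_choices with the break-on-counter
def pvLoopA (phi : Int) : List Int → List Int → Int → List Int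
  | [], valid_e, _ => valid_e
  | number :: rest, valid_e, l_counter =>
    if l_counter > 3333 then valid_e
    else if Int.gcd phi number = 1 then
      pvLoopA phi rest (valid_e ++ [number]) (l_counter + 1)
    else pvLoopA phi rest valid_e l_counter

def PublicKeys (phi : Int) : List Int :=
  -- e_choices: the odd numbers of range(2, phi+1) (built by append in A = filter)
  pvLoopA phi
    ((PySem.List.pyRange 2 (phi + 1) 1).filter (fun number => PySem.Int.band number 1 == 1))
    [] 0

-- ===== PORT B =====
-- inner `while m % d == 0: m //= d` (the 2 ≤ d / 0 < m guards only ensure totality)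
def pvStrip (m d : Nat) : Nat :=
  if h : 2 ≤ d ∧ 0 < m ∧ m % d = 0 then pvStrip (m / d) d else m
termination_by m
decreasing_by exact Nat.div_lt_self h.2.1 (by omega)

theorem pvStrip_le (m d : Nat) : pvStrip m d ≤ m := by
  induction m using Nat.strong_induction_on with
  | _ m ih =>
    rw [pvStrip]
    split
    · rename_i h
      exact le_trans (ih _ (Nat.div_lt_self h.2.1 (by omega))) (Nat.div_le_self _ _)
    · exact le_refl m

-- outer trial-division loop collecting the distinct prime factors
def pvFactors (m d : Nat) : List Nat :=
  if h : 2 ≤ d ∧ d * d ≤ m then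
    if m % d = 0 then d :: pvFactors (pvStrip m d) (d + 1)
    else pvFactors m (d + 1)
  else if 1 < m then [m] else []
termination_by (m, m + 2 - d)
decreasing_by
  · have h1 : pvStrip m d < m := by
      rw [pvStrip, dif_pos ⟨h.1, by nlinarith [h.2], by omega⟩]
      exact lt_of_le_of_lt (pvStrip_le _ _) (Nat.div_lt_self (by nlinarith [h.2]) (by omega))
    exact Prod.Lex.left _ _ h1
  · exact Prod.Lex.right _ (by
      have hdm : d ≤ m := le_trans (Nat.le_mul_of_pos_left _ (by omega)) h.2
      omega)

-- the while-loop of B: odd candidates n = 3, 5, … with the 3334 cap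
def pvLoopB (phi : Int) (primes : List Nat) (valid_e : List Int) (n : Int) : List Int :=
  if hc : n ≤ phi ∧ valid_e.length < 3334 then
    if ∀ p ∈ primes, PySem.Int.mod n (p : Int) ≠ 0 then
      pvLoopB phi primes (valid_e ++ [n]) (n + 2)
    else pvLoopB phi primes valid_e (n + 2)
  else valid_e
termination_by (phi + 1 - n).toNat
decreasing_by all_goals omega

def PublicKeys_alt (phi : Int) : List Int :=
  if phi < 3 then []
  else pvLoopB phi (pvFactors phi.toNat 2) [] 3

-- ===== PRECONDITION & SPEC =====
def Spec_PublicKeys (phi : Int) (out : List Int) : Prop := out = PublicKeys_alt phi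
instance (phi : Int) (out : List Int) : Decidable (Spec_PublicKeys phi out) := by unfold Spec_PublicKeys; infer_instance

-- ===== CLAIM (what is proved, stated in full; the proofs are below) =====
def Claim_equal_PublicKeys : Prop := ∀ (phi : Int), Dom_PublicKeys phi → Spec_PublicKeys phi (PublicKeys phi)

-- ===== LEMMAS AND PROOFS =====

theorem pvStrip_dvd (m d : Nat) : pvStrip m d ∣ m := by
  induction m using Nat.strong_induction_on with
  | _ m ih =>
    rw [pvStrip]
    split
    · rename_i h
      have hdvd : d ∣ m := Nat.dvd_of_mod_eq_zero h.2.2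
      exact dvd_trans (ih _ (Nat.div_lt_self h.2.1 (by omega))) (Nat.div_dvd_of_dvd hdvd)
    · exact dvd_refl m

theorem pvStrip_not_dvd (m d : Nat) (hd : 2 ≤ d) (hm : 0 < m) : ¬ d ∣ pvStrip m d := by
  induction m using Nat.strong_induction_on with
  | _ m ih =>
    rw [pvStrip]
    split
    · rename_i h
      have hdvd : d ∣ m := Nat.dvd_of_mod_eq_zero h.2.2
      exact ih _ (Nat.div_lt_self h.2.1 (by omega))
        (Nat.div_pos (Nat.le_of_dvd hm hdvd) (by omega))
    · rename_i h
      intro hdm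
      exact h ⟨hd, hm, Nat.mod_eq_zero_of_dvd hdm⟩

theorem pvStrip_prime_dvd (m d q : Nat) (hd : d.Prime) (hq : q.Prime) (hne : q ≠ d)
    (hdvd : q ∣ m) : q ∣ pvStrip m d := by
  induction m using Nat.strong_induction_on with
  | _ m ih =>
    rw [pvStrip]
    split
    · rename_i h
      have hdm : d ∣ m := Nat.dvd_of_mod_eq_zero h.2.2
      have hq' : q ∣ m / d := by
        have hmul : d * (m / d) = m := Nat.mul_div_cancel' hdm
        have hqm : q ∣ d * (m / d) := by rw [hmul]; exact hdvd
        rcases (Nat.Prime.dvd_mul hq).1 hqm with h1 | h2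
        · exact absurd ((Nat.prime_dvd_prime_iff_eq hq hd).1 h1) hne
        · exact h2
      exact ih _ (Nat.div_lt_self h.2.1 (by omega)) hq'
    · exact hdvd

theorem pvFactors_mem (m d : Nat) :
    0 < m → 2 ≤ d → (∀ e, 2 ≤ e → e < d → ¬ e ∣ m) →
    ∀ q, (q ∈ pvFactors m d ↔ q.Prime ∧ q ∣ m) := by
  induction m, d using pvFactors.induct with
  | case1 m d h hmod ih =>
    intro hm hd hinv q
    have hdm : d ∣ m := Nat.dvd_of_mod_eq_zero hmod
    have hdprime : d.Prime := by
      rw [Nat.prime_def_minFac]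
      refine ⟨h.1, ?_⟩
      have h1 : d.minFac ∣ m := dvd_trans (Nat.minFac_dvd d) hdm
      have h2 : d.minFac.Prime := Nat.minFac_prime (by omega)
      have h3 : d ≤ d.minFac := by
        by_contra hlt
        exact hinv d.minFac h2.two_le (by omega) h1
      exact le_antisymm (Nat.minFac_le (by omega)) h3
    have hstrip_dvd := pvStrip_dvd m d
    have hstrip_pos : 0 < pvStrip m d := Nat.pos_of_dvd_of_pos hstrip_dvd hm
    have hinv' : ∀ e, 2 ≤ e → e < d + 1 → ¬ e ∣ pvStrip m d := by
      intro e he hlt hedvd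
      by_cases hed : e = d
      · exact pvStrip_not_dvd m d h.1 hm (hed ▸ hedvd)
      · exact hinv e he (by omega) (dvd_trans hedvd hstrip_dvd)
    rw [pvFactors, dif_pos h, if_pos hmod]
    simp only [List.mem_cons, ih hstrip_pos (by omega) hinv' q]
    constructor
    · rintro (rfl | ⟨hqp, hqd⟩)
      · exact ⟨hdprime, hdm⟩
      · exact ⟨hqp, dvd_trans hqd hstrip_dvd⟩
    · rintro ⟨hqp, hqd⟩
      by_cases hqe : q = d
      · exact Or.inl hqe
      · exact Or.inr ⟨hqp, pvStrip_prime_dvd m d q hdprime hqp hqe hqd⟩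
  | case2 m d h hmod ih =>
    intro hm hd hinv q
    have hinv' : ∀ e, 2 ≤ e → e < d + 1 → ¬ e ∣ m := by
      intro e he hlt hedvd
      by_cases hed : e = d
      · exact hmod (Nat.mod_eq_zero_of_dvd (hed ▸ hedvd))
      · exact hinv e he (by omega) hedvd
    rw [pvFactors, dif_pos h, if_neg hmod]
    exact ih hm (by omega) hinv' q
  | case3 m d h h1 =>
    intro hm hd hinv q
    have hlt : m < d * d := by
      by_contra hge
      exact h ⟨hd, by omega⟩
    have hmp : m.Prime := by
      by_contra hnp
      have hmf := Nat.minFac_prime (show m ≠ 1 by omega)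
      have hsq : m.minFac ^ 2 ≤ m := Nat.minFac_sq_le_self hm hnp
      have hge : d ≤ m.minFac := by
        by_contra hlt'
        exact hinv m.minFac hmf.two_le (by omega) (Nat.minFac_dvd m)
      nlinarith
    rw [pvFactors, dif_neg h, if_pos h1]
    simp only [List.mem_singleton]
    constructor
    · rintro rfl; exact ⟨hmp, dvd_refl _⟩
    · rintro ⟨hqp, hqd⟩
      rcases (Nat.Prime.eq_one_or_self_of_dvd hmp q hqd) with h' | h'
      · exact absurd h' hqp.ne_one
      · exact h'
  | case4 m d h h1 =>
    intro hm hd hinv q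
    rw [pvFactors, dif_neg h, if_neg h1]
    have hm1 : m = 1 := by omega
    simp only [List.not_mem_nil, false_iff]
    rintro ⟨hqp, hqd⟩
    exact hqp.ne_one (Nat.eq_one_of_dvd_one (hm1 ▸ hqd))

-- gcd(phi, n) = 1  ↔  no trial-division prime factor of phi divides n
theorem pv_key (phi n : Int) (hphi : 3 ≤ phi) (hn : 1 ≤ n) :
    (Int.gcd phi n = 1) ↔ ∀ p ∈ pvFactors phi.toNat 2, PySem.Int.mod n (p : Int) ≠ 0 := by
  have hmem := pvFactors_mem phi.toNat 2 (by omega) (by omega)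
    (by intro e he hlt; omega)
  have habs : phi.toNat = phi.natAbs := by omega
  have hnabs : (n.natAbs : Int) = n := Int.natAbs_of_nonneg (by omega)
  constructor
  · intro hg p hp hmod
    have hdvdn : (p : Int) ∣ n := PySem.Int.mod_eq_zero_iff_dvd n (p : Int) |>.1 hmod
    obtain ⟨hpp, hpd⟩ := (hmem p).1 hp
    have hdn : p ∣ n.natAbs := by
      rwa [← hnabs, Int.natCast_dvd_natCast] at hdvdn
    have hdphi : p ∣ phi.natAbs := habs ▸ hpd
    have : p ∣ Nat.gcd phi.natAbs n.natAbs := Nat.dvd_gcd hdphi hdn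
    rw [Int.gcd] at hg
    rw [hg] at this
    exact hpp.ne_one (Nat.eq_one_of_dvd_one this)
  · intro hall
    rw [Int.gcd]
    by_contra hne
    have : ¬ Nat.Coprime phi.natAbs n.natAbs := hne
    obtain ⟨p, hpp, hp1, hp2⟩ := Nat.Prime.not_coprime_iff_dvd.1 this
    have hpmem : p ∈ pvFactors phi.toNat 2 := (hmem p).2 ⟨hpp, habs ▸ hp1⟩
    refine hall p hpmem ?_
    rw [PySem.Int.mod_eq_zero_iff_dvd]
    rw [← hnabs]
    exact Int.natCast_dvd_natCast.2 hp2

-- dropping the even successor from the filtered range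
theorem pv_filter_even (phi k : Int) (hk : k % 2 = 0) :
    (PySem.List.pyRange k (phi + 1) 1).filter (fun x => PySem.Int.band x 1 == 1)
      = (PySem.List.pyRange (k + 1) (phi + 1) 1).filter (fun x => PySem.Int.band x 1 == 1) := by
  by_cases h : k ≤ phi
  · rw [PySem.List.pyRange_one_cons (by omega)]
    rw [List.filter_cons]
    have : PySem.Int.band k 1 = 0 := by
      rw [PySem.Int.band_one, PySem.Int.mod_eq_emod_of_pos (by omega)]; omega
    simp [this]
  · rw [PySem.List.pyRange_one_eq_nil (by omega), PySem.List.pyRange_one_eq_nil (by omega)]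

-- the simulation: A's counted loop over the filtered range = B's odd-stepping while loop
theorem pv_sim (phi : Int) (hphi : 3 ≤ phi) :
    ∀ k n valid, (phi + 1 - n).toNat = k → 3 ≤ n → n % 2 = 1 →
      pvLoopA phi
        ((PySem.List.pyRange n (phi + 1) 1).filter (fun x => PySem.Int.band x 1 == 1))
        valid (valid.length : Int)
      = pvLoopB phi (pvFactors phi.toNat 2) valid n := by
  intro k
  induction k using Nat.strong_induction_on with
  | _ k ih =>
    intro n valid hk h3 hodd
    by_cases hn : n ≤ phi
    · rw [PySem.List.pyRange_one_cons (by omega), List.filter_cons]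
      have hb : PySem.Int.band n 1 == 1 := by
        rw [PySem.Int.band_one, PySem.Int.mod_eq_emod_of_pos (by omega), hodd]
        rfl
      rw [if_pos hb, pv_filter_even phi (n + 1) (by omega), show n + 1 + 1 = n + 2 from by ring]
      rw [pvLoopA, pvLoopB]
      by_cases hcnt : valid.length < 3334
      · rw [dif_pos ⟨hn, hcnt⟩]
        have hcnt' : ¬ ((valid.length : Int) > 3333) := by omega
        rw [if_neg hcnt']
        have hkey := pv_key phi n hphi (by omega)
        by_cases hg : Int.gcd phi n = 1
        · rw [if_pos hg, if_pos (hkey.1 hg)]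
          have hlen : ((valid ++ [n]).length : Int) = (valid.length : Int) + 1 := by
            simp
          rw [← hlen]
          exact ih ((phi + 1 - (n + 2)).toNat) (by omega) (n + 2) (valid ++ [n]) rfl
            (by omega) (by omega)
        · rw [if_neg hg, if_neg (fun h => hg (hkey.2 h))]
          exact ih ((phi + 1 - (n + 2)).toNat) (by omega) (n + 2) valid rfl
            (by omega) (by omega)
      · rw [dif_neg (by tauto)]
        rw [if_pos (by omega : (valid.length : Int) > 3333)]
    · rw [PySem.List.pyRange_one_eq_nil (by omega)]
      rw [List.filter_nil, pvLoopA, pvLoopB, dif_neg (by tauto)]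

-- ===== VERDICT (by name: the statement is the Claim_ definition above) =====
theorem PublicKeys_spec : Claim_equal_PublicKeys := by
  intro phi _
  unfold Spec_PublicKeys PublicKeys PublicKeys_alt
  by_cases h3 : phi < 3
  · rw [if_pos h3]
    by_cases h1 : phi ≤ 1
    · rw [PySem.List.pyRange_one_eq_nil (by omega), List.filter_nil, pvLoopA]
    · have h2 : phi = 2 := by omega
      subst h2
      rw [pv_filter_even 2 2 (by omega), PySem.List.pyRange_one_eq_nil (by omega),
        List.filter_nil, pvLoopA]
  · rw [if_neg h3]
    have hs := pv_sim phi (by omega) ((phi + 1 - 3).toNat) 3 [] rfl (by omega) (by omega)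
    rw [pv_filter_even phi 2 (by omega)]
    simpa using hs
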